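-- pv_equiv track=rewrite | github.com/TheDramaturgy/eepran | core/topology.py | __find_crosshaul_routes
-- ===== SOURCE A (Python) =====
-- import itertools
--
-- def __find_crosshaul_routes(path: list) -> list:
--     """
--     Generates routes for all possible combinations of crosshaul of the given path.
--     """
--     # Converting Nodes to Indexes
--     # Example:
--     #   ['node1', 'node2', 'node4', 'node5'] -> [0, 1, 2, 3]
--     path_indexes = [idx for idx, _ in enumerate(path)]
--
--     # Size 2 combinations in chain format
--     # Example:
--     #   [0, 1, 2, 3] -> [(0, 1), (1, 2), (2, 3)]
--     subsets = [subset for subset in itertools.combinations(path_indexes, 2)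
--                     if subset[1] - subset[0] == 1]
--
--     # All combinations of the subsets
--     # Example:
--     #   [(0, 1), (1, 2), (2, 3)] -> [[(0, 1)], [(1, 2)], ..., [(0, 1), (1, 2)],
--     #    [(0, 1), (2, 3)], ..., [(0, 1), (1, 2), (2, 3)]]
--     subsets = [list(subset) for L in range(len(subsets)+1)
--                     for subset in itertools.combinations(subsets, L)]
--     subsets = subsets[1:]
--
--     # Get only the subsets that forms a chain
--     # Example:
--     # [[(0, 1)], [(1, 2)], ..., [(0, 1), (1, 2)], [(1, 2), (2, 3)],
--     #  ..., [(1, 2), (2, 3), (3, 4)], [(0, 1), (1, 2), (2, 3), (3, 4)]]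
--     chained_subsets = []
--     for subset in subsets:
--         should_remain = True
--         for idx in range(len(subset)-1):
--             if(subset[idx][-1] != subset[idx+1][0]):
--                 should_remain = False
--         if should_remain:
--             chained_subsets.append(subset)
--
--     # Combine chained subsets into paths from start to end
--     # Example:
--     #   path_len_2 = [[(0, 1)], [(1, 2), (2, 3), (3, 4)]]
--     #   path_len_3 = [[(0, 1)], [(1, 2), (2, 3)], [(3, 5)]]
--     routes_len_1 = [[route] for route in chained_subsets if len(route) == len(path)-1]
--     routes_len_2 = []
--     routes_len_3 = []
--     for subset_a in chained_subsets:
--         for subset_b in chained_subsets: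
--             if (subset_a[-1][-1] == subset_b[0][0] and
--                     len(subset_a) + len(subset_b) == len(path)-1):
--                 routes_len_2.append([subset_a, subset_b])
--             for subset_c in chained_subsets:
--                 if (subset_a[-1][-1] == subset_b[0][0] and
--                         subset_b[-1][-1] == subset_c[0][0] and
--                         len(subset_a) + len(subset_b) + len(subset_c) == len(path)-1):
--                     routes_len_3.append([subset_a, subset_b, subset_c])
--
--     # Converting Indexes back to Nodes
--     routes_len_1 = [[[(path[i], path[j]) for i, j in xhaul]
--                         for xhaul in route] for route in routes_len_1]
--     routes_len_2 = [[[(path[i], path[j]) for i, j in xhaul]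
--                         for xhaul in route] for route in routes_len_2]
--     routes_len_3 = [[[(path[i], path[j]) for i, j in xhaul]
--                         for xhaul in route] for route in routes_len_3]
--
--     return routes_len_3 + routes_len_2 + routes_len_1
-- ===== SOURCE B (Python) =====
-- def __find_crosshaul_routes(path: list) -> list:
--     """
--     Generates routes for all possible combinations of crosshaul of the given path,
--     by enumerating 0/1/2 cut points among the interior nodes directly.
--     """
--     n = len(path)
--     m = n - 1  # number of edges
--     edges = [(path[i], path[i + 1]) for i in range(m)]
--     routes = []
--     # 3-segment routes: two cuts a < b among interior positions 1..m-1
--     for a in range(1, m - 1):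
--         for b in range(a + 1, m):
--             routes.append([edges[0:a], edges[a:b], edges[b:m]])
--     # 2-segment routes: one cut a
--     for a in range(1, m):
--         routes.append([edges[0:a], edges[a:m]])
--     # 1-segment route: the whole path
--     if m >= 1:
--         routes.append([edges[0:m]])
--     return routes
-- ===== Notes on version B (the rewrite author's own statement) =====
-- stated objective: faster
-- what changed: Instead of building all 2^(n-1) subsets of adjacent index pairs, filtering the contiguous ones, and combining them with nested cubic loops, B enumerates the 0/1/2 cut points among the interior nodes directly and slices the edge list.
import Mathlib
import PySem

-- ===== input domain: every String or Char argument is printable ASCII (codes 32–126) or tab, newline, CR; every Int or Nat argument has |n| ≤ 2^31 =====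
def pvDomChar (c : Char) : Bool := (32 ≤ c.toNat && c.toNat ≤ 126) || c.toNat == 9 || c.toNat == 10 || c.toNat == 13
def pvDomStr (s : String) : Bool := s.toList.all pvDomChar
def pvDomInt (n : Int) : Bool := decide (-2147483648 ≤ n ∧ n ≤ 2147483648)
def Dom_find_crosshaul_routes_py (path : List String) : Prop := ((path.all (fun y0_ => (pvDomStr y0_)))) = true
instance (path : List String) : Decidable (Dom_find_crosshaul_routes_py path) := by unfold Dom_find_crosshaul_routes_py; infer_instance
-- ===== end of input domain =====

-- B re-implements A by enumerating the 0/1/2 cut points among the interior nodes directly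
-- (O(n^3)) instead of A's filtering of all 2^(n-1) subsets of adjacent pairs followed by a
-- cubic pairing loop; same return value, proved below.

-- ===== PORT A =====
-- itertools.combinations(l, 2) as ordered pairs, in itertools' order (positions lexicographic).
def pvPairs {α : Type} : List α → List (α × α)
  | [] => []
  | x :: xs => (xs.map (fun y => (x, y))) ++ pvPairs xs

-- itertools.combinations(l, L), in itertools' order.
def pvCombos {α : Type} : Nat → List α → List (List α)
  | 0, _ => [[]]
  | _ + 1, [] => []
  | L + 1, x :: xs => ((pvCombos L xs).map (fun t => x :: t)) ++ pvCombos (L + 1) xs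

-- A's inner `should_remain` loop: every adjacent pair of segments must link
-- (subset[idx][-1] == subset[idx+1][0]); the Python loop scans all adjacent positions and
-- the result is the conjunction of all checks, which this structural recursion computes.
def pvChainOk : List (Nat × Nat) → Bool
  | a :: b :: t => (a.2 == b.1) && pvChainOk (b :: t)
  | _ => true

-- subset[0] / subset[-1]: every chained subset is nonempty, so the default is never read.
def pvHeadP (l : List (Nat × Nat)) : Nat × Nat := l.headD (0, 0)
def pvLastP (l : List (Nat × Nat)) : Nat × Nat := l.getLastD (0, 0)

-- Literal port of A. Indices are Nats: `path_indexes` is range(n) (enumerate positions),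
-- combinations(…, 2) yields pairs (i, j) with i < j, so `subset[1] - subset[0] == 1` is the
-- Nat comparison `j - i == 1`; the length comparisons `… == n - 1` use Nat `n - 1`, which is
-- exact because for n = 0 (Python compares against -1) all compared lists are nonempty-length
-- sums ≥ 1 — in fact chained_subsets is empty then.  path[i] with 0 ≤ i < n is `getD i ""`.
def find_crosshaul_routes_py (path : List String) : List (List (List (String × String))) :=
  let n := path.length
  let path_indexes := List.range n
  let subsets1 := (pvPairs path_indexes).filter (fun p => p.2 - p.1 == 1)
  let subsets := ((List.range (subsets1.length + 1)).flatMap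
                    (fun L => pvCombos L subsets1)).drop 1
  let chained := subsets.filter pvChainOk
  let routes1 := (chained.filter (fun r => r.length == n - 1)).map (fun r => [r])
  let routes2 := chained.foldl (fun acc a => chained.foldl (fun acc b =>
      if ((pvLastP a).2 == (pvHeadP b).1) && (a.length + b.length == n - 1)
      then acc ++ [[a, b]] else acc) acc) []
  let routes3 := chained.foldl (fun acc a => chained.foldl (fun acc b =>
      chained.foldl (fun acc c =>
        if ((pvLastP a).2 == (pvHeadP b).1) && (((pvLastP b).2 == (pvHeadP c).1)
            && (a.length + b.length + c.length == n - 1))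
        then acc ++ [[a, b, c]] else acc) acc) acc) []
  let conv := fun (route : List (List (Nat × Nat))) =>
    route.map (fun xh => xh.map (fun ij => (path.getD ij.1 "", path.getD ij.2 "")))
  (routes3.map conv) ++ (routes2.map conv) ++ (routes1.map conv)

-- ===== PORT B =====
-- Literal port of B (Source B): edges[i] = (path[i], path[i+1]); edges[i:j] with 0 ≤ i ≤ j is
-- drop/take; the three append loops become flatMap/map/++ in the same order.
def find_crosshaul_routes_py_alt (path : List String) : List (List (List (String × String))) :=
  let n := path.length
  let m := n - 1
  let edges := (List.range m).map (fun i => (path.getD i "", path.getD (i + 1) ""))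
  let seg := fun (i j : Nat) => (edges.drop i).take (j - i)
  let r3 := (List.range' 1 (m - 1 - 1)).flatMap (fun a =>
      (List.range' (a + 1) (m - (a + 1))).map (fun b => [seg 0 a, seg a b, seg b m]))
  let r2 := (List.range' 1 (m - 1)).map (fun a => [seg 0 a, seg a m])
  let r1 := if 1 ≤ m then [[seg 0 m]] else []
  r3 ++ r2 ++ r1

-- ===== PRECONDITION & SPEC =====
def Spec_find_crosshaul_routes_py (path : List String) (out : List (List (List (String × String)))) : Prop := out = find_crosshaul_routes_py_alt path
instance (path : List String) (out : List (List (List (String × String)))) : Decidable (Spec_find_crosshaul_routes_py path out) := by unfold Spec_find_crosshaul_routes_py; infer_instance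

-- ===== CLAIM (what is proved, stated in full; the proofs are below) =====
def Claim_equal_find_crosshaul_routes_py : Prop := ∀ (path : List String), Dom_find_crosshaul_routes_py path → Spec_find_crosshaul_routes_py path (find_crosshaul_routes_py path)

-- ===== LEMMAS AND PROOFS =====

-- The contiguous run of index edges [(a,a+1), …, (a+k-1,a+k)].
def eRun : Nat → Nat → List (Nat × Nat)
  | _, 0 => []
  | a, k + 1 => (a, a + 1) :: eRun (a + 1) k

theorem eRun_eq_map_range' (a k : Nat) : eRun a k = (List.range' a k).map (fun t => (t, t + 1)) := by
  induction k generalizing a with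
  | zero => rfl
  | succ k ih => simp [eRun, List.range'_succ, ih]

theorem length_eRun (a k : Nat) : (eRun a k).length = k := by
  simp [eRun_eq_map_range']

theorem headP_eRun (a k : Nat) : pvHeadP (eRun a (k + 1)) = (a, a + 1) := rfl

theorem eRun_getLastD (k : Nat) : ∀ (a : Nat) (d : Nat × Nat),
    (eRun a (k + 1)).getLastD d = (a + k, a + k + 1) := by
  induction k with
  | zero => intro a d; rfl
  | succ k ih =>
      intro a d
      show ((a, a + 1) :: eRun (a + 1) (k + 1)).getLastD d = _
      rw [List.getLastD_cons, ih (a + 1) (a, a + 1)]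
      congr 1 <;> omega

theorem lastP_eRun (a k : Nat) : pvLastP (eRun a (k + 1)) = (a + k, a + k + 1) :=
  eRun_getLastD k a (0, 0)

-- membership facts for pvCombos
theorem pvCombos_length {α : Type} (L : Nat) (l : List α) :
    ∀ t ∈ pvCombos L l, t.length = L := by
  induction l generalizing L with
  | nil => cases L <;> simp [pvCombos]
  | cons x xs ih =>
      cases L with
      | zero => simp [pvCombos]
      | succ L =>
          intro t ht
          simp only [pvCombos, List.mem_append, List.mem_map] at ht
          rcases ht with ⟨t', ht', rfl⟩ | ht
          · simp [ih L t' ht']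
          · exact ih (L + 1) t ht

theorem pvCombos_mem_mem {α : Type} (L : Nat) (l : List α) :
    ∀ t ∈ pvCombos L l, ∀ x ∈ t, x ∈ l := by
  induction l generalizing L with
  | nil => cases L <;> simp [pvCombos]
  | cons y xs ih =>
      cases L with
      | zero => simp [pvCombos]
      | succ L =>
          intro t ht x hx
          simp only [pvCombos, List.mem_append, List.mem_map] at ht
          rcases ht with ⟨t', ht', rfl⟩ | ht
          · rcases List.mem_cons.mp hx with rfl | hx
            · exact List.mem_cons_self
            · exact List.mem_cons_of_mem _ (ih L t' ht' x hx)
          · exact List.mem_cons_of_mem _ (ih (L + 1) t ht x hx)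

-- elements of eRun
theorem mem_eRun {a k : Nat} {p : Nat × Nat} (h : p ∈ eRun a k) :
    a ≤ p.1 ∧ p.1 < a + k ∧ p.2 = p.1 + 1 := by
  rw [eRun_eq_map_range'] at h
  simp only [List.mem_map, List.mem_range'_1] at h
  obtain ⟨t, ⟨h1, h2⟩, rfl⟩ := h
  exact ⟨h1, by omega, rfl⟩

-- A's edge list: combinations(range, 2) filtered to adjacent pairs is the full run.
theorem pairs_filter_range' (k : Nat) : ∀ (a : Nat),
    (pvPairs (List.range' a k)).filter (fun p => p.2 - p.1 == 1) = eRun a (k - 1) := by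
  induction k with
  | zero => intro a; rfl
  | succ k ih =>
      intro a
      rw [List.range'_succ]
      show ((List.range' (a + 1) k).map (fun y => (a, y)) ++ pvPairs (List.range' (a + 1) k)).filter _ = _
      rw [List.filter_append, ih (a + 1), List.filter_map]
      have hfirst : (List.range' (a + 1) k).filter
          ((fun (p : Nat × Nat) => p.2 - p.1 == 1) ∘ (fun y => (a, y)))
          = if 0 < k then [a + 1] else [] := by
        cases k with
        | zero => rfl
        | succ k =>
            rw [List.range'_succ, List.filter_cons]
            have hrest : (List.range' (a + 2) k).filter
                ((fun (p : Nat × Nat) => p.2 - p.1 == 1) ∘ (fun y => (a, y))) = [] := by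
              refine List.filter_eq_nil_iff.mpr (fun y hy => ?_)
              have := List.mem_range'_1.mp hy
              simp only [Function.comp_def, beq_iff_eq]
              omega
            simp only [Function.comp_def] at hrest ⊢
            simp [hrest]
      rw [hfirst]
      cases k with
      | zero => rfl
      | succ k => simp [eRun]

-- linking a new head edge to a chain
theorem chainOk_cons (x y : Nat) (t : List (Nat × Nat)) :
    pvChainOk ((x, y) :: t) = (pvChainOk t && ((t.headD (y, 0)).1 == y)) := by
  cases t with
  | nil => simp [pvChainOk]
  | cons q r =>
      show ((y == q.1) && pvChainOk (q :: r)) = _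
      have hb : (y == q.1) = (q.1 == y) := by
        by_cases h : y = q.1
        · simp [h]
        · simp [h]
          omega
      simp [Bool.and_comm, hb]

-- chains of length L inside a run that must start at b: exactly the length-L prefix.
theorem headChains (L : Nat) : ∀ (k b : Nat),
    (pvCombos L (eRun b k)).filter (fun t => pvChainOk t && ((t.headD (b, 0)).1 == b))
      = if L ≤ k then [eRun b L] else [] := by
  induction L with
  | zero =>
      intro k b
      simp [pvCombos, pvChainOk, eRun]
  | succ L ih =>
      intro k b
      cases k with
      | zero => simp [eRun, pvCombos]
      | succ k =>
          show ((pvCombos (L + 1) ((b, b + 1) :: eRun (b + 1) k)).filter _) = _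
          simp only [pvCombos, List.filter_append, List.filter_map]
          have h1 : (pvCombos L (eRun (b + 1) k)).filter
              ((fun t => pvChainOk t && ((t.headD (b, 0)).1 == b)) ∘ (fun t => (b, b + 1) :: t))
              = if L ≤ k then [eRun (b + 1) L] else [] := by
            rw [← ih k (b + 1)]
            refine List.filter_congr (fun t _ => ?_)
            simp [chainOk_cons]
          have h2 : (pvCombos (L + 1) (eRun (b + 1) k)).filter
              (fun t => pvChainOk t && ((t.headD (b, 0)).1 == b)) = [] := by
            refine List.filter_eq_nil_iff.mpr (fun t ht => ?_)
            have hlen := pvCombos_length (L + 1) (eRun (b + 1) k) t ht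
            cases t with
            | nil => simp at hlen
            | cons p r =>
                have hp : p ∈ eRun (b + 1) k :=
                  pvCombos_mem_mem (L + 1) (eRun (b + 1) k) _ ht p List.mem_cons_self
                have := mem_eRun hp
                simp only [List.headD_cons, Bool.and_eq_true, beq_iff_eq, not_and]
                intro _
                omega
          rw [h1, h2]
          by_cases hLk : L ≤ k
          · simp [hLk, eRun]
          · simp [hLk]

-- all chains among the combinations of a run: the contiguous sub-runs, by start position.
theorem chainFilter (k : Nat) : ∀ (a L : Nat),
    (pvCombos (L + 1) (eRun a k)).filter pvChainOk
      = (List.range (k - L)).map (fun s => eRun (a + s) (L + 1)) := by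
  induction k with
  | zero => intro a L; simp [eRun, pvCombos]
  | succ k ih =>
      intro a L
      show ((pvCombos (L + 1) ((a, a + 1) :: eRun (a + 1) k)).filter _) = _
      simp only [pvCombos, List.filter_append, List.filter_map]
      rw [ih (a + 1) L]
      have h1 : (pvCombos L (eRun (a + 1) k)).filter (pvChainOk ∘ (fun t => (a, a + 1) :: t))
          = if L ≤ k then [eRun (a + 1) L] else [] := by
        rw [← headChains L k (a + 1)]
        refine List.filter_congr (fun t _ => ?_)
        simp [chainOk_cons]
      rw [h1]
      by_cases hLk : L ≤ k
      · rw [if_pos hLk]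
        have hk : k + 1 - L = (k - L) + 1 := by omega
        rw [hk, List.range_succ_eq_map]
        simp only [List.map_cons, List.map_map, Nat.add_zero]
        refine List.cons_eq_cons.mpr ⟨rfl, ?_⟩
        refine List.map_congr_left (fun s _ => ?_)
        simp only [Function.comp_def, Nat.succ_eq_add_one]
        congr 1
        omega
      · have h0 : k + 1 - L = 0 := by omega
        have h0' : k - L = 0 := by omega
        simp [hLk, h0, h0']

-- the canonical chained_subsets list: for L = 1..m, runs of length L by start position
def pvC (m : Nat) : List (List (Nat × Nat)) :=
  (List.range m).flatMap (fun L => (List.range (m - L)).map (fun s => eRun s (L + 1)))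

theorem chained_eq (m : Nat) :
    ((((List.range (m + 1)).flatMap (fun L => pvCombos L (eRun 0 m)))).drop 1).filter pvChainOk
      = pvC m := by
  rw [List.range_succ_eq_map, List.flatMap_cons]
  show ((pvCombos 0 (eRun 0 m) ++ _).drop 1).filter _ = _
  have h0 : pvCombos 0 (eRun 0 m) = [[]] := by cases eRun 0 m <;> rfl
  rw [h0, List.singleton_append, List.drop_succ_cons, List.drop_zero, List.flatMap_map,
    List.filter_flatMap]
  unfold pvC
  refine List.flatMap_congr (fun L _ => ?_)
  show (pvCombos (L + 1) (eRun 0 m)).filter pvChainOk = _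
  rw [chainFilter m 0 L]
  refine List.map_congr_left (fun s _ => ?_)
  rw [Nat.zero_add]

-- generic helpers
theorem flatMap_single {β : Type} (k j : Nat) (g : Nat → List β)
    (h : ∀ i, i < k → i ≠ j → g i = []) :
    (List.range k).flatMap g = if j < k then g j else [] := by
  induction k with
  | zero => simp
  | succ k ih =>
      rw [List.range_succ, List.flatMap_append]
      simp only [List.flatMap_cons, List.flatMap_nil, List.append_nil]
      rw [ih (fun i hi hij => h i (by omega) hij)]
      rcases Nat.lt_trichotomy j k with hj | rfl | hj
      · rw [if_pos hj, if_pos (by omega), h k (by omega) (by omega), List.append_nil]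
      · rw [if_neg (by omega), if_pos (by omega), List.nil_append]
      · rw [if_neg (by omega), if_neg (by omega), h k (by omega) (by omega), List.append_nil]

theorem filter_range_lt (a b : Nat) :
    (List.range a).filter (fun L => decide (L < b)) = List.range (min a b) := by
  induction a with
  | zero => simp
  | succ a ih =>
      rw [List.range_succ, List.filter_append, ih, List.filter_cons]
      by_cases h : a < b
      · have h1 : min a b = a := by omega
        have h2 : min (a + 1) b = a + 1 := by omega
        simp [h, h1, List.range_succ]
      · have h1 : min (a + 1) b = min a b := by omega
        simp [h, h1]

theorem filter_range_eq_single (k x : Nat) :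
    (List.range k).filter (fun s => x == s) = if x < k then [x] else [] := by
  induction k with
  | zero => simp
  | succ k ih =>
      rw [List.range_succ, List.filter_append, ih, List.filter_cons]
      rcases Nat.lt_trichotomy x k with h | rfl | h
      · have h1 : x < k + 1 := by omega
        have h2 : (x == k) = false := by simp; omega
        simp [h, h1, h2]
      · simp
      · have h1 : ¬ x < k := by omega
        have h2 : ¬ x < k + 1 := by omega
        have h3 : (x == k) = false := by simp; omega
        simp [h1, h2, h3]

theorem flatMap_range_shrink {β : Type} (k j : Nat) (g : Nat → List β) (hj : j ≤ k)
    (h : ∀ i, j ≤ i → g i = []) :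
    (List.range k).flatMap g = (List.range j).flatMap g := by
  obtain ⟨t, rfl⟩ := Nat.exists_eq_add_of_le hj
  rw [List.range_add, List.flatMap_append]
  have : ((List.range t).map (j + ·)).flatMap g = [] := by
    rw [List.flatMap_map, List.flatMap_eq_nil_iff]
    intro x _
    exact h _ (by omega)
  simp [this]

-- the selection lemma: among all runs, those with given head start and complementary length
theorem selectSum (m x w : Nat) :
    (pvC m).filter (fun b => (x == (pvHeadP b).1) && (w + b.length == m))
      = if w < m ∧ x + (m - w) ≤ m then [eRun x (m - w)] else [] := by
  unfold pvC
  rw [List.filter_flatMap]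
  have hblock : ∀ L, ((List.range (m - L)).map (fun s => eRun s (L + 1))).filter
      (fun b => (x == (pvHeadP b).1) && (w + b.length == m))
      = if w + (L + 1) = m
        then ((List.range (m - L)).filter (fun s => x == s)).map (fun s => eRun s (L + 1))
        else [] := by
    intro L
    rw [List.filter_map]
    have hc : (List.range (m - L)).filter
        ((fun b => (x == (pvHeadP b).1) && (w + b.length == m)) ∘ (fun s => eRun s (L + 1)))
        = (List.range (m - L)).filter (fun s => (x == s) && (w + (L + 1) == m)) := by
      refine List.filter_congr (fun s _ => ?_)
      simp [headP_eRun, length_eRun]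
    rw [hc]
    by_cases hm : w + (L + 1) = m
    · rw [if_pos hm]
      congr 1
      refine List.filter_congr (fun s _ => ?_)
      simp [hm]
    · rw [if_neg hm]
      have : (List.range (m - L)).filter (fun s => (x == s) && (w + (L + 1) == m)) = [] := by
        refine List.filter_eq_nil_iff.mpr (fun s _ => ?_)
        simp only [Bool.and_eq_true, beq_iff_eq, not_and]
        intro _
        omega
      rw [this, List.map_nil]
  by_cases hw : w < m
  · rw [flatMap_single m (m - w - 1) _
      (fun L _ hne => by rw [hblock L, if_neg (by omega)]),
      if_pos (by omega), hblock (m - w - 1), if_pos (by omega), filter_range_eq_single]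
    have hmw : m - (m - w - 1) = w + 1 := by omega
    have hmw2 : m - w - 1 + 1 = m - w := by omega
    rw [hmw, hmw2]
    by_cases hx : x < w + 1
    · rw [if_pos hx, if_pos (by omega), List.map_cons, List.map_nil]
    · rw [if_neg hx, if_neg (by omega), List.map_nil]
  · rw [if_neg (by omega), List.flatMap_eq_nil_iff]
    intro L _
    rw [hblock L, if_neg (by omega)]

theorem pvC_def (m : Nat) : pvC m
    = (List.range m).flatMap (fun L => (List.range (m - L)).map (fun s => eRun s (L + 1))) := rfl

theorem flatMap_ite_singleton {α β : Type} (l : List α) (p : α → Prop) [DecidablePred p]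
    (f : α → β) :
    l.flatMap (fun x => if p x then [f x] else []) = (l.filter (fun x => decide (p x))).map f := by
  induction l with
  | nil => rfl
  | cons x xs ih =>
      rw [List.flatMap_cons, List.filter_cons, ih]
      by_cases h : p x <;> simp [h]

-- routes_len_1: only the full run qualifies
theorem routes1_eq (m : Nat) :
    ((pvC m).filter (fun r => r.length == m)).map (fun r => [r])
      = if 0 < m then [[eRun 0 m]] else [] := by
  rw [pvC_def, List.filter_flatMap]
  have hblock : ∀ L, ((List.range (m - L)).map (fun s => eRun s (L + 1))).filter
      (fun r => r.length == m) = if L + 1 = m then [eRun 0 m] else [] := by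
    intro L
    rw [List.filter_map]
    have hc : (List.range (m - L)).filter
        ((fun (r : List (Nat × Nat)) => r.length == m) ∘ (fun s => eRun s (L + 1)))
        = (List.range (m - L)).filter (fun _ => (L + 1 : Nat) == m) := by
      refine List.filter_congr (fun s _ => ?_)
      simp [length_eRun]
    rw [hc]
    by_cases hm : L + 1 = m
    · have h1 : m - L = 1 := by omega
      simp [hm, h1, List.range_succ]
    · have : ((L + 1 : Nat) == m) = false := by simp [hm]
      simp [this, hm]
  rw [flatMap_single m (m - 1) _ (fun L hL hne => by rw [hblock L, if_neg (by omega)])]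
  by_cases hm : 0 < m
  · rw [if_pos (by omega), hblock (m - 1), if_pos (by omega), if_pos hm]
    rfl
  · rw [if_neg (by omega), if_neg hm]
    rfl

-- routes_len_2: one cut
theorem routes2_eq (m : Nat) :
    (pvC m).flatMap (fun a => ((pvC m).filter (fun b =>
        ((pvLastP a).2 == (pvHeadP b).1) && (a.length + b.length == m))).map (fun b => [a, b]))
      = (List.range (m - 1)).map (fun L => [eRun 0 (L + 1), eRun (L + 1) (m - (L + 1))]) := by
  nth_rewrite 2 [pvC_def]
  rw [List.flatMap_assoc]
  have hG : ∀ L s, ((pvC m).filter (fun b =>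
      ((pvLastP (eRun s (L + 1))).2 == (pvHeadP b).1)
        && ((eRun s (L + 1)).length + b.length == m))).map (fun b => [eRun s (L + 1), b])
      = if L + 1 < m ∧ s + L + 1 + (m - (L + 1)) ≤ m
        then [[eRun s (L + 1), eRun (s + L + 1) (m - (L + 1))]] else [] := by
    intro L s
    have hpred : (fun (b : List (Nat × Nat)) =>
        ((pvLastP (eRun s (L + 1))).2 == (pvHeadP b).1)
          && ((eRun s (L + 1)).length + b.length == m))
        = (fun b => ((s + L + 1) == (pvHeadP b).1) && ((L + 1) + b.length == m)) := by
      funext b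
      rw [lastP_eRun, length_eRun]
    rw [hpred, selectSum m (s + L + 1) (L + 1), apply_ite (List.map (fun b => [eRun s (L + 1), b]))]
    rfl
  have hblockAll : ∀ L, (fun L => ((List.range (m - L)).map (fun s => eRun s (L + 1))).flatMap
      (fun a => ((pvC m).filter (fun b => ((pvLastP a).2 == (pvHeadP b).1)
        && (a.length + b.length == m))).map (fun b => [a, b]))) L
      = (fun L => if L + 1 < m then [[eRun 0 (L + 1), eRun (L + 1) (m - (L + 1))]] else []) L := by
    intro L
    simp only
    rw [List.flatMap_map]
    have hs : ∀ s, s < m - L → s ≠ 0 → ((pvC m).filter (fun b =>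
        ((pvLastP (eRun s (L + 1))).2 == (pvHeadP b).1)
          && ((eRun s (L + 1)).length + b.length == m))).map (fun b => [eRun s (L + 1), b])
        = [] := by
      intro s _ hs0
      rw [hG L s, if_neg (by omega)]
    rw [flatMap_single (m - L) 0 _ hs]
    by_cases hL : L + 1 < m
    · rw [if_pos (by omega), if_pos hL, hG L 0, if_pos ⟨hL, by omega⟩]
      norm_num
    · rw [if_neg hL]
      by_cases h0 : 0 < m - L
      · rw [if_pos h0, hG L 0, if_neg (by omega)]
      · rw [if_neg h0]
  refine Eq.trans (List.flatMap_congr (fun L _ => hblockAll L)) ?_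
  rw [flatMap_ite_singleton (List.range m) (fun L => L + 1 < m)]
  have hf : (List.range m).filter (fun L => decide (L + 1 < m))
      = (List.range m).filter (fun L => decide (L < m - 1)) := by
    refine List.filter_congr (fun L _ => ?_)
    simp only [decide_eq_decide]
    omega
  rw [hf, filter_range_lt]
  have hmin : min m (m - 1) = m - 1 := by omega
  rw [hmin]

-- routes_len_3: two cuts
theorem routes3_eq (m : Nat) :
    (pvC m).flatMap (fun a => (pvC m).flatMap (fun b => ((pvC m).filter (fun c =>
        ((pvLastP a).2 == (pvHeadP b).1) && (((pvLastP b).2 == (pvHeadP c).1)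
          && (a.length + b.length + c.length == m)))).map (fun c => [a, b, c])))
      = (List.range (m - 2)).flatMap (fun L => (List.range (m - L - 2)).map (fun L' =>
          [eRun 0 (L + 1), eRun (L + 1) (L' + 1), eRun (L + L' + 2) (m - (L + L' + 2))])) := by
  -- innermost filter/map for fixed runs a = eRun s (L+1), b = eRun s' (L'+1)
  have hG3 : ∀ L s L' s', ((pvC m).filter (fun c =>
      ((pvLastP (eRun s (L + 1))).2 == (pvHeadP (eRun s' (L' + 1))).1)
        && (((pvLastP (eRun s' (L' + 1))).2 == (pvHeadP c).1)
          && ((eRun s (L + 1)).length + (eRun s' (L' + 1)).length + c.length == m)))).map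
            (fun c => [eRun s (L + 1), eRun s' (L' + 1), c])
      = if s' = s + L + 1
        then (if (L + 1) + (L' + 1) < m ∧ s' + L' + 1 + (m - ((L + 1) + (L' + 1))) ≤ m
              then [[eRun s (L + 1), eRun s' (L' + 1),
                     eRun (s' + L' + 1) (m - ((L + 1) + (L' + 1)))]] else [])
        else [] := by
    intro L s L' s'
    have hpred : (fun (c : List (Nat × Nat)) =>
        ((pvLastP (eRun s (L + 1))).2 == (pvHeadP (eRun s' (L' + 1))).1)
          && (((pvLastP (eRun s' (L' + 1))).2 == (pvHeadP c).1)
            && ((eRun s (L + 1)).length + (eRun s' (L' + 1)).length + c.length == m)))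
        = (fun c => ((s + L + 1) == s')
          && (((s' + L' + 1) == (pvHeadP c).1) && ((L + 1) + (L' + 1) + c.length == m))) := by
      funext c
      rw [lastP_eRun, lastP_eRun, headP_eRun, length_eRun, length_eRun]
    rw [hpred]
    by_cases hss : s' = s + L + 1
    · have htrue : ((s + L + 1 : Nat) == s') = true := by simp [hss]
      simp only [htrue, Bool.true_and]
      rw [selectSum m (s' + L' + 1) ((L + 1) + (L' + 1)),
        apply_ite (List.map (fun c => [eRun s (L + 1), eRun s' (L' + 1), c])), if_pos hss]
      rfl
    · have hfalse : ((s + L + 1 : Nat) == s') = false := by simp; omega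
      simp only [hfalse, Bool.false_and]
      rw [if_neg hss]
      simp
  -- collapse the s' loop
  have hB : ∀ L s L', (List.range (m - L')).flatMap (fun s' => ((pvC m).filter (fun c =>
      ((pvLastP (eRun s (L + 1))).2 == (pvHeadP (eRun s' (L' + 1))).1)
        && (((pvLastP (eRun s' (L' + 1))).2 == (pvHeadP c).1)
          && ((eRun s (L + 1)).length + (eRun s' (L' + 1)).length + c.length == m)))).map
            (fun c => [eRun s (L + 1), eRun s' (L' + 1), c]))
      = if s = 0 ∧ L + L' + 2 < m
        then [[eRun 0 (L + 1), eRun (L + 1) (L' + 1), eRun (L + L' + 2) (m - (L + L' + 2))]]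
        else [] := by
    intro L s L'
    rw [flatMap_single (m - L') (s + L + 1) _
      (fun s' _ hne => by rw [hG3 L s L' s', if_neg hne])]
    by_cases hg : s + L + 1 < m - L'
    · rw [if_pos hg, hG3, if_pos rfl]
      by_cases hc : (L + 1) + (L' + 1) < m
          ∧ s + L + 1 + L' + 1 + (m - ((L + 1) + (L' + 1))) ≤ m
      · rw [if_pos hc, if_pos (by omega)]
        have hs0 : s = 0 := by omega
        subst hs0
        simp only [Nat.zero_add]
        have e2 : L + 1 + L' + 1 = L + L' + 2 := by omega
        have e3 : (L + 1) + (L' + 1) = L + L' + 2 := by omega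
        rw [e2, e3]
      · rw [if_neg hc, if_neg (by omega)]
    · rw [if_neg hg, if_neg (by omega)]
  -- collapse the b loop (over pvC)
  have hBody : ∀ L s, (pvC m).flatMap (fun b => ((pvC m).filter (fun c =>
      ((pvLastP (eRun s (L + 1))).2 == (pvHeadP b).1) && (((pvLastP b).2 == (pvHeadP c).1)
        && ((eRun s (L + 1)).length + b.length + c.length == m)))).map
          (fun c => [eRun s (L + 1), b, c]))
      = if s = 0
        then (List.range (m - L - 2)).map (fun L' =>
          [eRun 0 (L + 1), eRun (L + 1) (L' + 1), eRun (L + L' + 2) (m - (L + L' + 2))])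
        else [] := by
    intro L s
    nth_rewrite 2 [pvC_def]
    rw [List.flatMap_assoc]
    have hperL' : ∀ L', ((List.range (m - L')).map (fun s' => eRun s' (L' + 1))).flatMap
        (fun b => ((pvC m).filter (fun c =>
          ((pvLastP (eRun s (L + 1))).2 == (pvHeadP b).1) && (((pvLastP b).2 == (pvHeadP c).1)
            && ((eRun s (L + 1)).length + b.length + c.length == m)))).map
              (fun c => [eRun s (L + 1), b, c]))
        = if s = 0 ∧ L + L' + 2 < m
          then [[eRun 0 (L + 1), eRun (L + 1) (L' + 1), eRun (L + L' + 2) (m - (L + L' + 2))]]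
          else [] := by
      intro L'
      rw [List.flatMap_map]
      exact hB L s L'
    refine Eq.trans (List.flatMap_congr (fun L' _ => hperL' L')) ?_
    by_cases hs : s = 0
    · rw [if_pos hs]
      have hsimp : ∀ L', (if s = 0 ∧ L + L' + 2 < m
          then [[eRun 0 (L + 1), eRun (L + 1) (L' + 1), eRun (L + L' + 2) (m - (L + L' + 2))]]
          else [])
          = if L + L' + 2 < m
            then [[eRun 0 (L + 1), eRun (L + 1) (L' + 1), eRun (L + L' + 2) (m - (L + L' + 2))]]
            else [] := fun L' => by simp [hs]
      refine Eq.trans (List.flatMap_congr (fun L' _ => hsimp L')) ?_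
      rw [flatMap_ite_singleton (List.range m) (fun L' => L + L' + 2 < m)]
      have hf : (List.range m).filter (fun L' => decide (L + L' + 2 < m))
          = (List.range m).filter (fun L' => decide (L' < m - L - 2)) := by
        refine List.filter_congr (fun L' _ => ?_)
        simp only [decide_eq_decide]
        omega
      rw [hf, filter_range_lt]
      have hmin : min m (m - L - 2) = m - L - 2 := by omega
      rw [hmin]
    · rw [if_neg hs, List.flatMap_eq_nil_iff]
      intro L' _
      rw [if_neg (by omega)]
  -- collapse the a loop
  nth_rewrite 3 [pvC_def]
  rw [List.flatMap_assoc]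
  have hperL : ∀ L, ((List.range (m - L)).map (fun s => eRun s (L + 1))).flatMap
      (fun a => (pvC m).flatMap (fun b => ((pvC m).filter (fun c =>
        ((pvLastP a).2 == (pvHeadP b).1) && (((pvLastP b).2 == (pvHeadP c).1)
          && (a.length + b.length + c.length == m)))).map (fun c => [a, b, c])))
      = (List.range (m - L - 2)).map (fun L' =>
          [eRun 0 (L + 1), eRun (L + 1) (L' + 1), eRun (L + L' + 2) (m - (L + L' + 2))]) := by
    intro L
    rw [List.flatMap_map]
    rw [flatMap_single (m - L) 0 _ (fun s _ hs => by rw [hBody L s, if_neg hs])]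
    by_cases h0 : 0 < m - L
    · rw [if_pos h0, hBody L 0, if_pos rfl]
    · rw [if_neg h0]
      have : m - L - 2 = 0 := by omega
      rw [this]
      rfl
  refine Eq.trans (List.flatMap_congr (fun L _ => hperL L)) ?_
  refine (flatMap_range_shrink m (m - 2) _ (by omega) (fun L hL => ?_)).trans rfl
  have : m - L - 2 = 0 := by omega
  rw [this]
  rfl

-- bridge: a slice of the edge list is a mapped index run
theorem seg_eq (path : List String) (m i j : Nat) (hij : j - i ≤ m - i) :
    ((((List.range m).map (fun t => (path.getD t "", path.getD (t + 1) ""))).drop i).take (j - i))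
      = (eRun i (j - i)).map (fun ij => (path.getD ij.1 "", path.getD ij.2 "")) := by
  rw [← List.map_drop, ← List.map_take, List.range_eq_range', List.drop_range']
  simp only [Nat.mul_one, Nat.zero_add]
  rw [List.take_range'_of_length_ge hij, eRun_eq_map_range', List.map_map]
  rfl

-- ===== VERDICT (by name: the statement is the Claim_ definition above) =====
theorem find_crosshaul_routes_py_spec : Claim_equal_find_crosshaul_routes_py := by
  intro path _
  show find_crosshaul_routes_py path = find_crosshaul_routes_py_alt path
  simp only [find_crosshaul_routes_py, find_crosshaul_routes_py_alt]
  rw [List.range_eq_range', pairs_filter_range' path.length 0, length_eRun]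
  rw [chained_eq (path.length - 1)]
  simp only [PySem.List.foldl_append_if, PySem.List.foldl_append_eq_flatMap, List.nil_append]
  rw [routes1_eq, routes2_eq, routes3_eq]
  set m := path.length - 1 with hm
  congr 1
  · congr 1
    · -- the 3-segment routes
      rw [List.map_flatMap]
      rw [show m - 1 - 1 = m - 2 from by omega, List.range'_eq_map_range, List.flatMap_map]
      refine List.flatMap_congr (fun L hL => ?_)
      have hLlt : L < m - 2 := List.mem_range.mp hL
      rw [List.map_map, List.range'_eq_map_range, List.map_map,
        show m - (1 + L + 1) = m - L - 2 from by omega]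
      refine List.map_congr_left (fun L' hL' => ?_)
      have hL'lt : L' < m - L - 2 := List.mem_range.mp hL'
      simp only [Function.comp_def]
      rw [seg_eq path m 0 (1 + L) (by omega),
        seg_eq path m (1 + L) (1 + L + 1 + L') (by omega),
        seg_eq path m (1 + L + 1 + L') m (by omega)]
      simp only [List.map_cons, List.map_nil]
      rw [show 1 + L + 1 + L' - (1 + L) = L' + 1 from by omega,
        show 1 + L + 1 + L' = L + L' + 2 from by omega,
        show 1 + L - 0 = L + 1 from by omega,
        show 1 + L = L + 1 from by omega]
    · -- the 2-segment routes
      rw [List.map_map, List.range'_eq_map_range, List.map_map]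
      refine List.map_congr_left (fun L hL => ?_)
      have hLlt : L < m - 1 := List.mem_range.mp hL
      simp only [Function.comp_def]
      rw [seg_eq path m 0 (1 + L) (by omega), seg_eq path m (1 + L) m (by omega)]
      simp only [List.map_cons, List.map_nil]
      rw [show 1 + L - 0 = L + 1 from by omega, show 1 + L = L + 1 from by omega]
  · -- the 1-segment route
    by_cases h : 0 < m
    · rw [if_pos h, if_pos (show 1 ≤ m from by omega), seg_eq path m 0 m (by omega)]
      simp only [List.map_cons, List.map_nil]
      rw [show m - 0 = m from by omega]
    · rw [if_neg h, if_neg (by omega)]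
      rfl
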